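-- pv_equiv track=rewrite | github.com/ahanaf019/CSE3132-DSP-python | signal_operations.py | AddSignals
-- ===== SOURCE A (Python) =====
-- def AddSignals(n1, n2, x1, x2):
--     nmin = min(min(n1), min(n2))
--     nmax = max(max(n1), max(n2))
--     n = []
--     y1 = []
--     y2 = []
--     y1c = False
--     y2c = False
--
--     i = nmin
--     while(i <= nmax):
--         n.append(i)
--
--         if i >= min(n1) and i <= max(n1):
--             if(not y1c):
--                     for elem in x1:
--                         y1.append(elem)
--                     y1c = True
--         else:
--             y1.append(0)
--
--         if i >= min(n2) and i <= max(n2):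
--             if(not y2c):
--                     for elem in x2:
--                         y2.append(elem)
--                     y2c = True
--         else:
--             y2.append(0)
--         i += 1
--
--     y = []
--     for i in range(0, len(n)):
--         y.append(y1[i] + y2[i])
--
--     return n, y
-- ===== SOURCE B (Python) =====
-- def AddSignals(n1, n2, x1, x2):
--     nmin = min(min(n1), min(n2))
--     nmax = max(max(n1), max(n2))
--     n = list(range(nmin, nmax + 1))
--     y1 = [0] * (min(n1) - nmin) + list(x1) + [0] * (nmax - max(n1))
--     y2 = [0] * (min(n2) - nmin) + list(x2) + [0] * (nmax - max(n2))
--     y = []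
--     for i in range(len(n)):
--         y.append(y1[i] + y2[i])
--     return n, y
-- ===== Notes on version B (the rewrite author's own statement) =====
-- stated objective: simpler
-- what changed: Replaces A's stateful index-walk (while loop with y1c/y2c dump-once flags and membership branches) by closed-form zero-padding: each padded signal is built directly as [0]*(min(nk)-nmin) + xk + [0]*(nmax-max(nk)) and n as list(range(nmin,nmax+1)), then one index loop adds them.
import Mathlib
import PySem

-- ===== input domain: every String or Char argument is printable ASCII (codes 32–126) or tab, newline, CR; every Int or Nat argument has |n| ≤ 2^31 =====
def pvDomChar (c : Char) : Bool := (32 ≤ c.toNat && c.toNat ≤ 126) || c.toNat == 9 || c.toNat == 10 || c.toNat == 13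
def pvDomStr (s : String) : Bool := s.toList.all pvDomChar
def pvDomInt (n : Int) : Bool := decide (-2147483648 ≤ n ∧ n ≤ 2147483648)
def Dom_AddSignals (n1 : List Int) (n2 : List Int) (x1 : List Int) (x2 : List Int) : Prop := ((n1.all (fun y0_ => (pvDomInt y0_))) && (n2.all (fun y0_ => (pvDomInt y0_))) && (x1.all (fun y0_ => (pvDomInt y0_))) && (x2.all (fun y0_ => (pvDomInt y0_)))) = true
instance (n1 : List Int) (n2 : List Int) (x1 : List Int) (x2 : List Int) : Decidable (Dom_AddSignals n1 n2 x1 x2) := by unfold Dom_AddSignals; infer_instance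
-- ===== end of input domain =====

-- B replaces A's stateful while-loop with dump-once flags by closed-form zero-padding concatenation (simpler); same return value.

-- ===== PORT A =====
-- helper: A's repeated branch 'if min≤i≤max then (dump x once, set flag) else append 0', on state (yk, ykc)
def pvStepSig (lo hi : Int) (x : List Int) (s : List Int × Bool) (i : Int) : List Int × Bool :=
  if lo ≤ i ∧ i ≤ hi then (if s.2 = false then (s.1 ++ x, true) else s)
  else (s.1 ++ [0], s.2)

def AddSignals (n1 : List Int) (n2 : List Int) (x1 : List Int) (x2 : List Int) : List Int × List Int :=
  let min1 := (PySem.List.min? n1 (fun y => y)).getD 0   -- min(n1); n1 ≠ [] by Pre_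
  let max1 := (PySem.List.max? n1 (fun y => y)).getD 0
  let min2 := (PySem.List.min? n2 (fun y => y)).getD 0
  let max2 := (PySem.List.max? n2 (fun y => y)).getD 0
  let nmin := min min1 min2
  let nmax := max max1 max2
  -- while i ≤ nmax, i += 1  ≡  fold over range(nmin, nmax+1); state (n, (y1,y1c), (y2,y2c))
  let st := (PySem.List.pyRange nmin (nmax + 1) 1).foldl
    (fun (st : List Int × (List Int × Bool) × (List Int × Bool)) i =>
      (st.1 ++ [i], pvStepSig min1 max1 x1 st.2.1 i, pvStepSig min2 max2 x2 st.2.2 i))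
    ([], ([], false), ([], false))
  let n := st.1
  let y1 := st.2.1.1
  let y2 := st.2.2.1
  -- for i in range(0, len(n)): y.append(y1[i] + y2[i])   (y1[i]/y2[i] raise outside Pre_; getD 0 is junk there)
  let y := (PySem.List.pyRange 0 (n.length : Int) 1).foldl
    (fun y i => y ++ [(PySem.List.pyGet? y1 i).getD 0 + (PySem.List.pyGet? y2 i).getD 0]) []
  (n, y)

-- ===== PORT B =====
def AddSignals_alt (n1 : List Int) (n2 : List Int) (x1 : List Int) (x2 : List Int) : List Int × List Int :=
  let min1 := (PySem.List.min? n1 (fun y => y)).getD 0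
  let max1 := (PySem.List.max? n1 (fun y => y)).getD 0
  let min2 := (PySem.List.min? n2 (fun y => y)).getD 0
  let max2 := (PySem.List.max? n2 (fun y => y)).getD 0
  let nmin := min min1 min2
  let nmax := max max1 max2
  let n := PySem.List.pyRange nmin (nmax + 1) 1
  -- [0]*k with k < 0 is [] in Python; Int.toNat clamps negatives to 0 the same way
  let y1 := List.replicate (min1 - nmin).toNat 0 ++ x1 ++ List.replicate (nmax - max1).toNat 0
  let y2 := List.replicate (min2 - nmin).toNat 0 ++ x2 ++ List.replicate (nmax - max2).toNat 0
  let y := (PySem.List.pyRange 0 (n.length : Int) 1).foldl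
    (fun y i => y ++ [(PySem.List.pyGet? y1 i).getD 0 + (PySem.List.pyGet? y2 i).getD 0]) []
  (n, y)

-- ===== PRECONDITION & SPEC =====
-- Pre_ excludes exactly the inputs where Python A raises: empty n1/n2 (ValueError from min/max) and
-- signals xk shorter than the span max(nk)-min(nk)+1, on which the final y loop raises IndexError.
-- (B raises at the very same inputs.)
def Pre_AddSignals (n1 : List Int) (n2 : List Int) (x1 : List Int) (x2 : List Int) : Prop :=
  n1 ≠ [] ∧ n2 ≠ [] ∧
  (PySem.List.max? n1 (fun y => y)).getD 0 - (PySem.List.min? n1 (fun y => y)).getD 0 + 1 ≤ (x1.length : Int) ∧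
  (PySem.List.max? n2 (fun y => y)).getD 0 - (PySem.List.min? n2 (fun y => y)).getD 0 + 1 ≤ (x2.length : Int)
instance (n1 : List Int) (n2 : List Int) (x1 : List Int) (x2 : List Int) : Decidable (Pre_AddSignals n1 n2 x1 x2) := by unfold Pre_AddSignals; infer_instance

def pvWitness_AddSignals : List Int × List Int × List Int × List Int :=
  ([0, 2], [1, 3], [5, 6, 7], [4, 4, 4])

def Spec_AddSignals (n1 : List Int) (n2 : List Int) (x1 : List Int) (x2 : List Int) (out : List Int × List Int) : Prop := out = AddSignals_alt n1 n2 x1 x2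
instance (n1 : List Int) (n2 : List Int) (x1 : List Int) (x2 : List Int) (out : List Int × List Int) : Decidable (Spec_AddSignals n1 n2 x1 x2 out) := by unfold Spec_AddSignals; infer_instance

-- ===== CLAIM (what is proved, stated in full; the proofs are below) =====
def Claim_equal_AddSignals : Prop := ∀ (n1 : List Int) (n2 : List Int) (x1 : List Int) (x2 : List Int), Dom_AddSignals n1 n2 x1 x2 → Pre_AddSignals n1 n2 x1 x2 → Spec_AddSignals n1 n2 x1 x2 (AddSignals n1 n2 x1 x2)

-- ===== LEMMAS AND PROOFS =====

-- the product fold splits into three independent folds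
theorem pvFoldSplit (min1 max1 min2 max2 : Int) (x1 x2 l : List Int)
    (a : List Int) (b c : List Int × Bool) :
    l.foldl (fun (st : List Int × (List Int × Bool) × (List Int × Bool)) i =>
        (st.1 ++ [i], pvStepSig min1 max1 x1 st.2.1 i, pvStepSig min2 max2 x2 st.2.2 i)) (a, b, c)
      = (l.foldl (fun n i => n ++ [i]) a, l.foldl (pvStepSig min1 max1 x1) b,
         l.foldl (pvStepSig min2 max2 x2) c) := by
  induction l generalizing a b c with
  | nil => rfl
  | cons x t ih => simp [List.foldl, ih]

theorem pvFoldApp (l : List Int) (a : List Int) :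
    l.foldl (fun n i => n ++ [i]) a = a ++ l := by
  induction l generalizing a with
  | nil => simp
  | cons x t ih => simp [List.foldl, ih]

theorem pvStepSig_out (lo hi : Int) (x : List Int) (l : List Int) (s : List Int × Bool)
    (h : ∀ i ∈ l, ¬ (lo ≤ i ∧ i ≤ hi)) :
    l.foldl (pvStepSig lo hi x) s = (s.1 ++ List.replicate l.length 0, s.2) := by
  induction l generalizing s with
  | nil => simp
  | cons a t ih =>
    have ha := h a (by simp)
    simp only [List.foldl]
    rw [pvStepSig, if_neg ha, ih _ (fun i hi => h i (by simp [hi]))]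
    simp [List.replicate_succ, List.append_assoc]

theorem pvStepSig_in_true (lo hi : Int) (x : List Int) (l : List Int) (ys : List Int)
    (h : ∀ i ∈ l, lo ≤ i ∧ i ≤ hi) :
    l.foldl (pvStepSig lo hi x) (ys, true) = (ys, true) := by
  induction l with
  | nil => rfl
  | cons a t ih =>
    simp only [List.foldl]
    rw [pvStepSig, if_pos (h a (by simp))]
    simpa using ih (fun i hi => h i (by simp [hi]))

theorem pvStepSig_range (lo hi nmin nmax : Int) (x : List Int)
    (h1 : nmin ≤ lo) (h2 : lo ≤ hi) (h3 : hi ≤ nmax) :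
    (PySem.List.pyRange nmin (nmax + 1) 1).foldl (pvStepSig lo hi x) ([], false)
      = (List.replicate (lo - nmin).toNat 0 ++ x ++ List.replicate (nmax - hi).toNat 0, true) := by
  have hr : PySem.List.pyRange nmin (nmax + 1) 1
      = PySem.List.pyRange nmin lo 1 ++ ((lo :: PySem.List.pyRange (lo + 1) (hi + 1) 1)
        ++ PySem.List.pyRange (hi + 1) (nmax + 1) 1) := by
    rw [PySem.List.pyRange_one_append nmin lo (nmax + 1) h1 (by omega),
        PySem.List.pyRange_one_append lo (hi + 1) (nmax + 1) (by omega) (by omega),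
        PySem.List.pyRange_one_cons (show lo < hi + 1 by omega)]
  rw [hr, List.foldl_append, List.foldl_append, List.foldl_cons]
  rw [pvStepSig_out lo hi x (PySem.List.pyRange nmin lo 1) ([], false) (by
        intro i hi'
        rw [PySem.List.mem_pyRange_one] at hi'
        omega)]
  have hstep : pvStepSig lo hi x
      (([] : List Int) ++ List.replicate (PySem.List.pyRange nmin lo 1).length 0, false) lo
      = (([] : List Int) ++ List.replicate (PySem.List.pyRange nmin lo 1).length 0 ++ x, true) := by
    simp [pvStepSig, h2]
  rw [hstep]
  rw [pvStepSig_in_true lo hi x _ _ (by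
        intro i hi'
        rw [PySem.List.mem_pyRange_one] at hi'
        omega)]
  rw [pvStepSig_out lo hi x _ _ (by
        intro i hi'
        rw [PySem.List.mem_pyRange_one] at hi'
        omega)]
  have e : nmax + 1 - (hi + 1) = nmax - hi := by ring
  simp [PySem.List.length_pyRange_one, e, List.append_assoc]

-- min(xs) ≤ max(xs) for nonempty xs
theorem pvMinLeMax (xs : List Int) (h : xs ≠ []) :
    (PySem.List.min? xs (fun y => y)).getD 0 ≤ (PySem.List.max? xs (fun y => y)).getD 0 := by
  obtain ⟨m, hm⟩ := Option.ne_none_iff_exists'.mp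
    (by rw [Ne, PySem.List.min?_eq_none_iff]; exact h :
      PySem.List.min? xs (fun y => y) ≠ none)
  obtain ⟨M, hM⟩ := Option.ne_none_iff_exists'.mp
    (by rw [Ne, PySem.List.max?_eq_none_iff]; exact h :
      PySem.List.max? xs (fun y => y) ≠ none)
  have := PySem.List.min?_isMin hm M (PySem.List.max?_mem hM)
  simp [hm, hM]
  exact this

-- ===== VERDICT (by name: the statement is the Claim_ definition above) =====
theorem AddSignals_spec : Claim_equal_AddSignals := by
  intro n1 n2 x1 x2 _ hpre
  obtain ⟨h1, h2, _, _⟩ := hpre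
  show AddSignals n1 n2 x1 x2 = AddSignals_alt n1 n2 x1 x2
  unfold AddSignals AddSignals_alt
  simp only []
  set min1 := (PySem.List.min? n1 (fun y => y)).getD 0 with hmin1
  set max1 := (PySem.List.max? n1 (fun y => y)).getD 0 with hmax1
  set min2 := (PySem.List.min? n2 (fun y => y)).getD 0 with hmin2
  set max2 := (PySem.List.max? n2 (fun y => y)).getD 0 with hmax2
  have hm1 : min1 ≤ max1 := pvMinLeMax n1 h1
  have hm2 : min2 ≤ max2 := pvMinLeMax n2 h2
  rw [pvFoldSplit, pvFoldApp,
      pvStepSig_range min1 max1 (min min1 min2) (max max1 max2) x1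
        (min_le_left _ _) hm1 (le_max_left _ _),
      pvStepSig_range min2 max2 (min min1 min2) (max max1 max2) x2
        (min_le_right _ _) hm2 (le_max_right _ _)]
  simp
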